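-- pv_equiv track=rewrite | github.com/ryanlayerlab/compg | src/2024.01.18/search.py | binary_search_plus
-- ===== SOURCE A (Python) =====
-- import bisect
--
-- def binary_search_plus(Q, D):
--     hits = 0
--     Q.sort()
--     D.sort()
--
--     for q in Q:
--         i = bisect.bisect_left(D, q)
--         if i < len(D) and D[i] == q:
--             hits += 1
--
--     return hits
-- ===== SOURCE B (Python) =====
-- def binary_search_plus(Q, D):
--     Q.sort()
--     D.sort()
--     i = j = 0
--     hits = 0
--     while i < len(Q) and j < len(D):
--         if Q[i] < D[j]:
--             i += 1
--         elif Q[i] > D[j]: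
--             j += 1
--         else:
--             hits += 1
--             i += 1  # leave j: repeated equal q values still match
--     return hits
-- ===== Notes on version B (the rewrite author's own statement) =====
-- stated objective: alternative
-- what changed: Replaces the per-element binary search into sorted D by a single two-pointer merge pass over the two sorted lists (advancing only the Q pointer on a match so duplicate q values each count); the in-place sorts of Q and D are kept to preserve A's mutation.
import Mathlib
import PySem

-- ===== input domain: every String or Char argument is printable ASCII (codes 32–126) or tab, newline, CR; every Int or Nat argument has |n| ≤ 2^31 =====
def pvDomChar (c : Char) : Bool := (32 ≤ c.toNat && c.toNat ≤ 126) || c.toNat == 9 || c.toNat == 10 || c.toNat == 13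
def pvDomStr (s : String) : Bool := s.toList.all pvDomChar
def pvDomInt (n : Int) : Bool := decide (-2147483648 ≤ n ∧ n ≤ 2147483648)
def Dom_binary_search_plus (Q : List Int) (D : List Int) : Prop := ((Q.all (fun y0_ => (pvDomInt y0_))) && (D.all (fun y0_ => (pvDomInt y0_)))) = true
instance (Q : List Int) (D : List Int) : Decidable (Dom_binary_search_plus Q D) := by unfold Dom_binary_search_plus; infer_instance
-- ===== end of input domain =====

-- B replaces the per-element binary search into sorted D by a single two-pointer merge
-- pass over the two sorted lists (objective: alternative); both versions sort Q and D in
-- place (same mutation), and the equivalence proved here is about the return value.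

-- ===== PORT A =====
def binary_search_plus (Q : List Int) (D : List Int) : Int :=
  -- hits = 0; Q.sort(); D.sort()
  let Qs := PySem.List.sorted Q (fun x => x) false
  let Ds := PySem.List.sorted D (fun x => x) false
  -- for q in Q: i = bisect.bisect_left(D, q); if i < len(D) and D[i] == q: hits += 1
  Qs.foldl (fun hits q =>
    let i := PySem.List.bisectLeft Ds q
    if i < Ds.length ∧ Ds.getD i 0 = q then hits + 1 else hits) 0

-- ===== PORT B =====
-- the while loop over indices i, j, transcribed as recursion over the two list tails
def pvMerge : List Int → List Int → Int
  | [], _ => 0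
  | _ :: _, [] => 0
  | q :: qs, d :: ds =>
    if q < d then pvMerge qs (d :: ds)          -- i += 1
    else if d < q then pvMerge (q :: qs) ds     -- j += 1
    else pvMerge qs (d :: ds) + 1               -- hits += 1; i += 1 (j stays)
termination_by qs ds => qs.length + ds.length

def binary_search_plus_alt (Q : List Int) (D : List Int) : Int :=
  -- Q.sort(); D.sort(); then the two-pointer merge count
  let Qs := PySem.List.sorted Q (fun x => x) false
  let Ds := PySem.List.sorted D (fun x => x) false
  pvMerge Qs Ds

-- ===== PRECONDITION & SPEC =====
def Spec_binary_search_plus (Q : List Int) (D : List Int) (out : Int) : Prop := out = binary_search_plus_alt Q D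
instance (Q : List Int) (D : List Int) (out : Int) : Decidable (Spec_binary_search_plus Q D out) := by unfold Spec_binary_search_plus; infer_instance

-- ===== CLAIM (what is proved, stated in full; the proofs are below) =====
def Claim_equal_binary_search_plus : Prop := ∀ (Q : List Int) (D : List Int), Dom_binary_search_plus Q D → Spec_binary_search_plus Q D (binary_search_plus Q D)

-- ===== LEMMAS AND PROOFS =====

-- On a sorted list, the bisect_left hit test is exactly membership.
theorem bisect_hit_iff_mem (Ds : List Int) (q : Int)
    (hs : Ds.Pairwise (· ≤ ·)) :
    (PySem.List.bisectLeft Ds q < Ds.length ∧ Ds.getD (PySem.List.bisectLeft Ds q) 0 = q)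
      ↔ q ∈ Ds := by
  obtain ⟨hle, hlt, hge⟩ := PySem.List.bisectLeft_spec Ds q hs
  set i := PySem.List.bisectLeft Ds q with hi
  constructor
  · rintro ⟨hlen, hget⟩
    rw [List.getD_eq_getElem _ _ hlen] at hget
    exact hget ▸ List.getElem_mem hlen
  · intro hmem
    obtain ⟨j, hj, hgj⟩ := List.mem_iff_getElem.mp hmem
    have hij : i ≤ j := by
      by_contra h
      have := hlt j hj (by omega)
      omega
    have hilen : i < Ds.length := lt_of_le_of_lt hij hj
    refine ⟨hilen, ?_⟩
    rw [List.getD_eq_getElem _ _ hilen]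
    have h1 : q ≤ Ds[i] := hge i hilen le_rfl
    have h2 : Ds[i] ≤ q := by
      rcases lt_or_eq_of_le hij with h | h
      · have := (List.pairwise_iff_getElem.mp hs) i j hilen hj h
        omega
      · simp [h, hgj]
    omega

-- On two sorted lists the merge count is the number of Q-elements that occur in D.
theorem pvMerge_eq_countP (Qs Ds : List Int)
    (hQ : Qs.Pairwise (· ≤ ·)) (hD : Ds.Pairwise (· ≤ ·)) :
    pvMerge Qs Ds = (Qs.countP (fun q => decide (q ∈ Ds)) : Int) := by
  induction Qs, Ds using pvMerge.induct with
  | case1 Ds => simp [pvMerge]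
  | case2 q qs => simp [pvMerge]
  | case3 q qs d ds hlt ih =>
    obtain ⟨hqle, hQ'⟩ := List.pairwise_cons.mp hQ
    have hqnot : q ∉ d :: ds := by
      intro hmem
      rcases List.mem_cons.mp hmem with h | h
      · omega
      · have := (List.pairwise_cons.mp hD).1 q h
        omega
    have h1 : ¬ q = d := by omega
    have h2 : q ∉ ds := fun h => absurd ((List.pairwise_cons.mp hD).1 q h) (by omega)
    rw [pvMerge, if_pos hlt, ih hQ' hD]
    simp [h1, h2]
  | case4 q qs d ds hnlt hgt ih =>
    obtain ⟨hqle, hQ'⟩ := List.pairwise_cons.mp hQ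
    have hcnt : List.countP (fun x => decide (x ∈ ds)) (q :: qs)
        = List.countP (fun x => decide (x ∈ d :: ds)) (q :: qs) := by
      apply List.countP_congr
      intro x hx
      have hqx : q ≤ x := by
        rcases List.mem_cons.mp hx with h | h
        · omega
        · exact hqle x h
      simp only [decide_eq_true_eq, List.mem_cons]
      constructor
      · intro h; exact Or.inr h
      · rintro (h | h)
        · omega
        · exact h
    rw [pvMerge, if_neg hnlt, if_pos hgt, ih hQ (List.Pairwise.of_cons hD), hcnt]
  | case5 q qs d ds hnlt hngt ih =>
    obtain ⟨hqle, hQ'⟩ := List.pairwise_cons.mp hQ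
    have hqd : q = d := by omega
    rw [pvMerge, if_neg hnlt, if_neg hngt, ih hQ' hD, List.countP_cons]
    simp [hqd]

-- ===== VERDICT (by name: the statement is the Claim_ definition above) =====
theorem binary_search_plus_spec : Claim_equal_binary_search_plus := by
  intro Q D _
  unfold Spec_binary_search_plus binary_search_plus binary_search_plus_alt
  set Qs := PySem.List.sorted Q (fun x => x) false with hQs
  set Ds := PySem.List.sorted D (fun x => x) false with hDs
  have hsQ : Qs.Pairwise (· ≤ ·) := PySem.List.sorted_pairwise (xs := Q) (key := fun x => x)
  have hsD : Ds.Pairwise (· ≤ ·) := PySem.List.sorted_pairwise (xs := D) (key := fun x => x)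
  rw [PySem.List.foldl_ite_add_one
        (fun q => PySem.List.bisectLeft Ds q < Ds.length ∧ Ds.getD (PySem.List.bisectLeft Ds q) 0 = q),
      pvMerge_eq_countP Qs Ds hsQ hsD, zero_add]
  congr 1
  apply List.countP_congr
  intro q _
  simp only [decide_eq_true_eq]
  exact bisect_hit_iff_mem Ds q hsD
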